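-- pv_equiv track=rewrite | github.com/NargathKain/NLP_2025 | Paradoteo1A/src/syntactic_analysis.py | fix_unusual_start
-- ===== SOURCE A (Python) =====
-- def fix_unusual_start(pos_tags):
--     # Fix: Sentence starts with adjective/adverb without structure
--     # Strategy: Move to after first noun phrase or verb
--     # Returns: Modified pos_tags
--     if len(pos_tags) < 2:
--         return pos_tags
--
--     first_token = pos_tags[0]
--
--     # Find first noun or verb
--     target_idx = None
--     for i in range(1, len(pos_tags)):
--         if pos_tags[i][1] in ['NN', 'NNS', 'NNP', 'NNPS', 'PRP'] or pos_tags[i][1].startswith('VB'):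
--             target_idx = i
--             break
--
--     if target_idx:
--         # Move adjective/adverb after target
--         new_tags = (
--             pos_tags[1:target_idx+1] +  # Skip first, go to target
--             [first_token] +  # Move first token here
--             pos_tags[target_idx+1:]  # Rest
--         )
--         return new_tags
--
--     return pos_tags
-- ===== SOURCE B (Python) =====
-- def fix_unusual_start(pos_tags):
--     # Single accumulating pass: copy the tail, dropping the first token in
--     # right after the first noun/verb; fall back to the original list if none.
--     if len(pos_tags) < 2:
--         return pos_tags
--     first_token = pos_tags[0]
--     result = []
--     placed = False
--     for tok in pos_tags[1:]:
--         result.append(tok)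
--         if not placed and (tok[1] in ('NN', 'NNS', 'NNP', 'NNPS', 'PRP')
--                            or tok[1].startswith('VB')):
--             result.append(first_token)
--             placed = True
--     return result if placed else pos_tags
-- ===== Notes on version B (the rewrite author's own statement) =====
-- stated objective: simpler
-- what changed: Replaces A's find-index-then-three-slice reconstruction (two traversals plus slicing) with one accumulating pass over the tail that inserts the first token right after the first noun/verb and uses a placed flag.
import Mathlib
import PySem

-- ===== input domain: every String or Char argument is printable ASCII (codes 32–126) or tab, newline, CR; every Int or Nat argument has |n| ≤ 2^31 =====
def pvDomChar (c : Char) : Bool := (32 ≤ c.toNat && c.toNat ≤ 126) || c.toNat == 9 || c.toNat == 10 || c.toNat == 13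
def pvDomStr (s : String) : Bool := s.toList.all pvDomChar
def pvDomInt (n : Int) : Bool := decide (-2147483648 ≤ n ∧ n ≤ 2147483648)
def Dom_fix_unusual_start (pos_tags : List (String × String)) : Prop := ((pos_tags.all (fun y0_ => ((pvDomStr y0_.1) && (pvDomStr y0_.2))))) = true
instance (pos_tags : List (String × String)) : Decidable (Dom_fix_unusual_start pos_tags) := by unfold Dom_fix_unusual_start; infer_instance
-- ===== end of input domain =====

-- B replaces A's find-target-index-then-slice reconstruction with a single
-- accumulating pass that inserts the first token right after the first noun/verb.


-- ===== PORT A =====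
-- the shared condition: tag in ['NN','NNS','NNP','NNPS','PRP'] or tag.startswith('VB')
def pvIsNV (tag : String) : Bool :=
  decide (tag ∈ ["NN", "NNS", "NNP", "NNPS", "PRP"]) || PySem.Str.startswith tag "VB"

-- the 'for i in range(1, len(pos_tags))' search with break, as recursion over the range list
def pvFindLoopA (pos_tags : List (String × String)) : List Int → Option Int
  | [] => none
  | i :: is =>
    if pvIsNV (PySem.List.pyGetD pos_tags i ("", "")).2 then some i
    else pvFindLoopA pos_tags is

def fix_unusual_start (pos_tags : List (String × String)) : List (String × String) :=
  if pos_tags.length < 2 then pos_tags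
  else
    let first_token := PySem.List.pyGetD pos_tags 0 ("", "")
    let target_idx := pvFindLoopA pos_tags (PySem.List.pyRange 1 pos_tags.length 1)
    match target_idx with
    -- the loop only ever returns an i ≥ 1, so Python's 'if target_idx:' truthiness = isSome
    | some t =>
        PySem.List.slice pos_tags (some 1) (some (t + 1))
          ++ [first_token]
          ++ PySem.List.slice pos_tags (some (t + 1)) none
    | none => pos_tags

-- ===== PORT B =====
-- the body of B's loop: append tok; if not placed and tok is a noun/verb, also append first_token
def pvStepB (first_token : String × String) (s : List (String × String) × Bool)
    (tok : String × String) : List (String × String) × Bool :=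
  let res := s.1 ++ [tok]
  if !s.2 && pvIsNV tok.2 then (res ++ [first_token], true) else (res, s.2)

def fix_unusual_start_alt (pos_tags : List (String × String)) : List (String × String) :=
  if pos_tags.length < 2 then pos_tags
  else
    match pos_tags with
    | [] => pos_tags
    | first_token :: tail =>
      let st := tail.foldl (pvStepB first_token) ([], false)
      if st.2 then st.1 else pos_tags

-- ===== PRECONDITION & SPEC =====
def Spec_fix_unusual_start (pos_tags : List (String × String)) (out : List (String × String)) : Prop := out = fix_unusual_start_alt pos_tags
instance (pos_tags : List (String × String)) (out : List (String × String)) : Decidable (Spec_fix_unusual_start pos_tags out) := by unfold Spec_fix_unusual_start; infer_instance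

-- ===== CLAIM (what is proved, stated in full; the proofs are below) =====
def Claim_equal_fix_unusual_start : Prop := ∀ (pos_tags : List (String × String)), Dom_fix_unusual_start pos_tags → Spec_fix_unusual_start pos_tags (fix_unusual_start pos_tags)

-- ===== LEMMAS AND PROOFS =====

-- A's search loop, started at index i with full.drop i = rest, finds the first
-- match of pvIsNV in rest (as an absolute index).
theorem pvFindLoopA_eq (full : List (String × String)) :
    ∀ (i : Nat) (rest : List (String × String)), full.drop i = rest →
      pvFindLoopA full (PySem.List.pyRange (i : Int) (full.length : Int) 1)
        = (rest.findIdx? (fun p => pvIsNV p.2)).map (fun j => ((i + j : Nat) : Int)) := by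
  intro i rest
  induction rest generalizing i with
  | nil =>
    intro h
    have hi : full.length ≤ i := by
      have := congrArg List.length h
      simp [List.length_drop] at this
      omega
    rw [PySem.List.pyRange_one_eq_nil (by exact_mod_cast hi)]
    simp [pvFindLoopA]
  | cons r rs ih =>
    intro h
    have hi : i < full.length := by
      have := congrArg List.length h
      simp [List.length_drop] at this
      omega
    have hget? : full[i]? = some r := by
      have h0 : (full.drop i)[0]? = some r := by rw [h]; rfl
      rw [List.getElem?_drop] at h0
      simpa using h0
    rw [PySem.List.pyRange_one_cons (by exact_mod_cast hi)]
    simp only [pvFindLoopA]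
    have hgd : PySem.List.pyGetD full (i : Int) ("", "") = r := by
      rw [PySem.List.pyGetD_natCast]
      simp [List.getD, hget?]
    rw [hgd, List.findIdx?_cons]
    by_cases hr : pvIsNV r.2
    · simp [hr]
    · have hdrop : full.drop (i + 1) = rs := by
        have := congrArg List.tail h
        simpa [List.tail_drop] using this
      have hih := ih (i + 1) hdrop
      simp only [hr, if_neg, Bool.false_eq_true, not_false_eq_true]
      rw [show ((i : Int) + 1) = (((i + 1 : Nat)) : Int) by push_cast; ring, hih]
      cases hF : rs.findIdx? (fun p => pvIsNV p.2) with
      | none => simp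
      | some k =>
        simp only [Option.map_some]
        congr 2
        omega

-- the top-level instance of the search lemma, with the casts as the port writes them
theorem pvFindLoopA_top (x : String × String) (rest : List (String × String)) :
    pvFindLoopA (x :: rest) (PySem.List.pyRange 1 ((x :: rest).length : Int) 1)
      = (rest.findIdx? (fun p => pvIsNV p.2)).map (fun j => ((1 + j : Nat) : Int)) := by
  have h := pvFindLoopA_eq (x :: rest) 1 rest (by simp)
  rwa [show ((1 : Nat) : Int) = 1 by norm_num] at h

-- A's two slices at the found index, in terms of take/drop on the tail
theorem sliceA_take (x : String × String) (rest : List (String × String)) (j : Nat) :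
    PySem.List.slice (x :: rest) (some 1) (some (((1 + j : Nat) : Int) + 1))
      = rest.take (j + 1) := by
  rw [show (((1 + j : Nat) : Int) + 1) = ((j + 2 : Nat) : Int) by push_cast; ring,
    show (1 : Int) = ((1 : Nat) : Int) by norm_num, PySem.List.slice_natCast]
  simp only [List.drop_one, List.tail_cons]
  congr 1

theorem sliceA_drop (x : String × String) (rest : List (String × String)) (j : Nat) :
    PySem.List.slice (x :: rest) (some (((1 + j : Nat) : Int) + 1)) none
      = rest.drop (j + 1) := by
  rw [show (((1 + j : Nat) : Int) + 1) = ((j + 2 : Nat) : Int) by push_cast; ring,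
    PySem.List.slice_from_natCast]
  simp [List.drop_succ_cons]

-- B's fold: already-placed state just copies the remaining tokens.
theorem foldB_placed (first : String × String) :
    ∀ (rest acc : List (String × String)),
      rest.foldl (pvStepB first) (acc, true) = (acc ++ rest, true) := by
  intro rest
  induction rest with
  | nil => intro acc; simp
  | cons r rs ih =>
    intro acc
    rw [List.foldl_cons, show pvStepB first (acc, true) r = (acc ++ [r], true) by
      simp [pvStepB], ih]
    simp

-- B's fold from the not-yet-placed state, characterised by findIdx?.
theorem foldB_eq (first : String × String) :
    ∀ (rest acc : List (String × String)),
      rest.foldl (pvStepB first) (acc, false)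
      = match rest.findIdx? (fun p => pvIsNV p.2) with
        | none => (acc ++ rest, false)
        | some j => (acc ++ rest.take (j + 1) ++ [first] ++ rest.drop (j + 1), true) := by
  intro rest
  induction rest with
  | nil => intro acc; simp
  | cons r rs ih =>
    intro acc
    rw [List.findIdx?_cons, List.foldl_cons]
    by_cases hr : pvIsNV r.2
    · rw [show pvStepB first (acc, false) r = (acc ++ [r] ++ [first], true) by
        simp [pvStepB, hr], foldB_placed]
      simp [hr]
    · rw [show pvStepB first (acc, false) r = (acc ++ [r], false) by
        simp [pvStepB, hr], ih (acc ++ [r])]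
      cases hF : rs.findIdx? (fun p => pvIsNV p.2) <;> simp [hr]

-- ===== VERDICT (by name: the statement is the Claim_ definition above) =====
theorem fix_unusual_start_spec : Claim_equal_fix_unusual_start := by
  intro pos_tags _
  unfold Spec_fix_unusual_start fix_unusual_start fix_unusual_start_alt
  by_cases hlen : pos_tags.length < 2
  · simp [hlen]
  · match pos_tags, hlen with
    | x :: rest, hlen =>
      simp only [if_neg hlen]
      rw [pvFindLoopA_top x rest, foldB_eq x rest []]
      cases hF : rest.findIdx? (fun p => pvIsNV p.2) with
      | none => simp
      | some j =>
        simp only [Option.map_some]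
        rw [sliceA_take, sliceA_drop]
        simp [PySem.List.pyGetD_zero_cons]
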